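-- pv_equiv track=rewrite | github.com/fran-veiga/Lexer | automatas/oprel.py | afd_oprel
-- ===== SOURCE A (Python) =====
-- def afd_oprel(lexema):
--     tabla_transicion = {
--         'A': {">":"B","<":"B","=":"C"},
--         'B': {"=":"D"},
--         'C': {"=":"D"},
--         'D': {},
--         'T': {}
--     }
--     estado_actual = "A"
--     estados_finales = ["B", "D"]
--
--     for c in lexema:
--         if c in tabla_transicion[estado_actual]:
--             estado_actual = tabla_transicion[estado_actual][c]
--         else:
--             estado_actual = 'T'
--             break
--     if estado_actual in estados_finales:
--         return "FINAL"
--     elif estado_actual == 'T':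
--         return "TRAMPA"
--     else:
--         return "NO FINAL"
-- ===== SOURCE B (Python) =====
-- def afd_oprel(lexema):
--     s = tuple(lexema)
--     if s in {('>',), ('<',), ('>', '='), ('<', '='), ('=', '=')}:
--         return "FINAL"
--     if s in {(), ('=',)}:
--         return "NO FINAL"
--     return "TRAMPA"
-- ===== Notes on version B (the rewrite author's own statement) =====
-- stated objective: simpler
-- what changed: Replaces the per-character DFA simulation (transition table + state loop with break) by whole-input classification: the accepted language is finite, so B just tests membership of the input in the FINAL and NO-FINAL sets.
import Mathlib
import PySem

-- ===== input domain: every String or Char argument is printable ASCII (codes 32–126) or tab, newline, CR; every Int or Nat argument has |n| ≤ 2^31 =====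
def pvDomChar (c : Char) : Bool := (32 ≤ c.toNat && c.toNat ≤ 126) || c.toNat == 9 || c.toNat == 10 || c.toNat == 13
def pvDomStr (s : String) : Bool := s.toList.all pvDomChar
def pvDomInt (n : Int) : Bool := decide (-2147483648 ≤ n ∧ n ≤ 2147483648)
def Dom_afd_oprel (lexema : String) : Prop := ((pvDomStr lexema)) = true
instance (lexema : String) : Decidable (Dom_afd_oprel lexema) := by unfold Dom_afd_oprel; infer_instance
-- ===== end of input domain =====

-- B replaces the DFA simulation by direct membership of the whole input in the finite
-- accepted/partially-accepted languages (objective: simpler); no speed claim.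

-- ===== PORT A =====
-- A's transition table (iterating a Python str yields its characters; inner keys are Char)
def afd_oprel_tabla : PySem.Dict String (PySem.Dict Char String) :=
  PySem.Dict.ofList
    [("A", PySem.Dict.ofList [('>', "B"), ('<', "B"), ('=', "C")]),
     ("B", PySem.Dict.ofList [('=', "D")]),
     ("C", PySem.Dict.ofList [('=', "D")]),
     ("D", PySem.Dict.ofList []),
     ("T", PySem.Dict.ofList [])]

-- A's for-loop with its break: reaching 'T' ends the loop at once
def afd_oprel_loop : List Char → String → String
  | [], estado => estado
  | c :: rest, estado =>
      match ((afd_oprel_tabla.getD estado (PySem.Dict.ofList [])).get? c) with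
      | some s => afd_oprel_loop rest s
      | none => "T"

def afd_oprel (lexema : String) : String :=
  let estado := afd_oprel_loop lexema.toList "A"
  if estado ∈ ["B", "D"] then "FINAL"
  else if estado = "T" then "TRAMPA"
  else "NO FINAL"

-- ===== PORT B =====
def afd_oprel_alt (lexema : String) : String :=
  let s := lexema.toList
  if s ∈ [['>'], ['<'], ['>', '='], ['<', '='], ['=', '=']] then "FINAL"
  else if s ∈ [([] : List Char), ['=']] then "NO FINAL"
  else "TRAMPA"

-- ===== PRECONDITION & SPEC =====
def Spec_afd_oprel (lexema : String) (out : String) : Prop := out = afd_oprel_alt lexema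
instance (lexema : String) (out : String) : Decidable (Spec_afd_oprel lexema out) := by unfold Spec_afd_oprel; infer_instance

-- ===== CLAIM (what is proved, stated in full; the proofs are below) =====
def Claim_equal_afd_oprel : Prop := ∀ (lexema : String), Dom_afd_oprel lexema → Spec_afd_oprel lexema (afd_oprel lexema)

-- ===== LEMMAS AND PROOFS =====

theorem loopA_gt (xs : List Char) : afd_oprel_loop ('>' :: xs) "A" = afd_oprel_loop xs "B" := rfl
theorem loopA_lt (xs : List Char) : afd_oprel_loop ('<' :: xs) "A" = afd_oprel_loop xs "B" := rfl
theorem loopA_eq (xs : List Char) : afd_oprel_loop ('=' :: xs) "A" = afd_oprel_loop xs "C" := rfl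
theorem loopB_eq (xs : List Char) : afd_oprel_loop ('=' :: xs) "B" = afd_oprel_loop xs "D" := rfl
theorem loopC_eq (xs : List Char) : afd_oprel_loop ('=' :: xs) "C" = afd_oprel_loop xs "D" := rfl

theorem loopA_other (xs : List Char) (c : Char) (h1 : c ≠ '>') (h2 : c ≠ '<') (h3 : c ≠ '=') :
    afd_oprel_loop (c :: xs) "A" = "T" := by
  have e1 : ('>' == c) = false := by simp [Ne.symm h1]
  have e2 : ('<' == c) = false := by simp [Ne.symm h2]
  have e3 : ('=' == c) = false := by simp [Ne.symm h3]
  simp [afd_oprel_loop, afd_oprel_tabla, PySem.Dict.get?, PySem.Dict.getD, PySem.Dict.ofList,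
    PySem.Dict.update, PySem.Dict.empty, PySem.Dict.insert, List.find?, e1, e2, e3]

theorem loopB_other (xs : List Char) (c : Char) (h : c ≠ '=') :
    afd_oprel_loop (c :: xs) "B" = "T" := by
  have e : ('=' == c) = false := by simp [Ne.symm h]
  simp [afd_oprel_loop, afd_oprel_tabla, PySem.Dict.get?, PySem.Dict.getD, PySem.Dict.ofList,
    PySem.Dict.update, PySem.Dict.empty, PySem.Dict.insert, List.find?, e]

theorem loopC_other (xs : List Char) (c : Char) (h : c ≠ '=') :
    afd_oprel_loop (c :: xs) "C" = "T" := by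
  have e : ('=' == c) = false := by simp [Ne.symm h]
  simp [afd_oprel_loop, afd_oprel_tabla, PySem.Dict.get?, PySem.Dict.getD, PySem.Dict.ofList,
    PySem.Dict.update, PySem.Dict.empty, PySem.Dict.insert, List.find?, e]

theorem loopD_any (xs : List Char) (c : Char) :
    afd_oprel_loop (c :: xs) "D" = "T" := by
  simp [afd_oprel_loop, afd_oprel_tabla, PySem.Dict.get?, PySem.Dict.getD, PySem.Dict.ofList,
    PySem.Dict.update, PySem.Dict.empty, PySem.Dict.insert, List.find?]

theorem afd_oprel_list_eq (l : List Char) :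
    (if afd_oprel_loop l "A" ∈ ["B", "D"] then "FINAL"
     else if afd_oprel_loop l "A" = "T" then "TRAMPA"
     else "NO FINAL")
    = (if l ∈ [['>'], ['<'], ['>', '='], ['<', '='], ['=', '=']] then "FINAL"
       else if l ∈ [([] : List Char), ['=']] then "NO FINAL"
       else "TRAMPA") := by
  match l with
  | [] => decide
  | c :: rest =>
    by_cases h1 : c = '>'
    · subst h1
      match rest with
      | [] => decide
      | d :: rest2 =>
        by_cases h4 : d = '='
        · subst h4
          match rest2 with
          | [] => decide
          | e :: rest3 => simp [loopA_gt, loopB_eq, loopD_any]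
        · simp [loopA_gt, loopB_other _ _ h4, h4]
    · by_cases h2 : c = '<'
      · subst h2
        match rest with
        | [] => decide
        | d :: rest2 =>
          by_cases h4 : d = '='
          · subst h4
            match rest2 with
            | [] => decide
            | e :: rest3 =>
              have : afd_oprel_loop ('<' :: '=' :: e :: rest3) "A" = "T" := by
                rw [loopA_lt]; simpa using loopD_any rest3 e
              simp [this]
          · have : afd_oprel_loop ('<' :: d :: rest2) "A" = "T" := by
              rw [loopA_lt]; simpa using loopB_other rest2 d h4
            simp [this, h4]
      · by_cases h3 : c = '='
        · subst h3
          match rest with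
          | [] => decide
          | d :: rest2 =>
            by_cases h4 : d = '='
            · subst h4
              match rest2 with
              | [] => decide
              | e :: rest3 => simp [loopA_eq, loopC_eq, loopD_any]
            · simp [loopA_eq, loopC_other _ _ h4, h4]
        · simp [loopA_other _ _ h1 h2 h3, h1, h2, h3]

-- ===== VERDICT (by name: the statement is the Claim_ definition above) =====
theorem afd_oprel_spec : Claim_equal_afd_oprel := by
  intro lexema _
  unfold Spec_afd_oprel afd_oprel afd_oprel_alt
  exact afd_oprel_list_eq lexema.toList
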